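-- pv_equiv track=rewrite | github.com/simonyang0608/LeetCode | Binary_Search/2560.House_Robber_IV/Python/2560.House_Robber_IV.py | robKth
-- ===== SOURCE A (Python) =====
-- def robKth(len_nums, nums, record_val, k):
--     """
--     :type len_nums: int
--     :type nums: List[int]
--     :type record_val: int
--     :type k: int
--     :rtype: bool
--     """
--
--     ############
--     #Initialize
--     ##### Record traversal pointer, summary counter #####
--     record_trav_ptr, record_cnter = 0, 0
--
--     ####################
--     #Whole process/flow
--     while (record_trav_ptr < len_nums):
--
--         ##### Check if the current indexed-value matched conditions or not #####
--         if (nums[record_trav_ptr] <= record_val):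
--             record_cnter += 1 #Keep updating/accumulating
--
--             record_trav_ptr += 2 #Keep updating/traversing
--         else:
--             record_trav_ptr += 1 #Keep updating/traversing
--
--     return (True if (record_cnter >= k) else False)
-- ===== SOURCE B (Python) =====
-- def robKth(len_nums, nums, record_val, k):
--     # Run-length decomposition: within each maximal run of L consecutive elements
--     # <= record_val, the greedy non-adjacent selection takes ceil(L/2) = (L+1)//2
--     # elements (a take at the end of a run skips only an element > record_val,
--     # which costs nothing). So the count is the sum of (L+1)//2 over runs.
--     total = 0
--     run = 0
--     for x in nums[:max(len_nums, 0)]: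
--         if x <= record_val:
--             run += 1
--         else:
--             total += (run + 1) // 2
--             run = 0
--     return total + (run + 1) // 2 >= k
-- ===== Notes on version B (the rewrite author's own statement) =====
-- stated objective: alternative
-- what changed: Replaces A's take/skip greedy simulation (pointer jumping by 1 or 2) with a run-length decomposition: one pass groups maximal runs of consecutive elements <= record_val and adds the closed form (run+1)//2 per run.
-- outside the precondition, e.g. on robKth(2, [0], 0, 1): A returns True, B returns True
import Mathlib
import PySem

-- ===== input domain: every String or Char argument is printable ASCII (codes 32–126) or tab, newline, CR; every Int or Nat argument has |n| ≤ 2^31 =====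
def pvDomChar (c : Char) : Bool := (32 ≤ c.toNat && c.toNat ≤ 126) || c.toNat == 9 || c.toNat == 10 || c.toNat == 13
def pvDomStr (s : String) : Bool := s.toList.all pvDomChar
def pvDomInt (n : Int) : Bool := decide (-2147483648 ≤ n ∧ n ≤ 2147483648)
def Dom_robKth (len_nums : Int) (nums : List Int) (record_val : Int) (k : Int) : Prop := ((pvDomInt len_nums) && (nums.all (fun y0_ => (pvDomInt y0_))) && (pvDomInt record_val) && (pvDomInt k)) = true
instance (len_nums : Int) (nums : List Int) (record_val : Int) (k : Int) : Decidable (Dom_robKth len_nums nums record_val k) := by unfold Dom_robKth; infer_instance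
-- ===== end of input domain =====

-- B replaces A's take/skip greedy simulation with a run-length pass adding (run+1)//2 per maximal run of elements <= record_val (objective: alternative).


-- ===== PORT A =====
-- the while loop: pointer jumps by 2 on a take, by 1 otherwise; none from pyGet? = IndexError (excluded by Pre_)
def robKthLoop (len_nums : Int) (nums : List Int) (record_val : Int) (ptr cnt : Int) : Int :=
  if _h : ptr < len_nums then
    match PySem.List.pyGet? nums ptr with
    | some v =>
        if v ≤ record_val then robKthLoop len_nums nums record_val (ptr + 2) (cnt + 1)
        else robKthLoop len_nums nums record_val (ptr + 1) cnt
    | none => cnt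
  else cnt
termination_by (len_nums - ptr).toNat
decreasing_by all_goals omega

def robKth (len_nums : Int) (nums : List Int) (record_val : Int) (k : Int) : Bool :=
  decide (robKthLoop len_nums nums record_val 0 0 ≥ k)

-- ===== PORT B =====
-- run-length pass: state = (total so far, length of the current run of elements ≤ record_val)
def robAltStep (record_val : Int) (st : Int × Int) (x : Int) : Int × Int :=
  if x ≤ record_val then (st.1, st.2 + 1)
  else (st.1 + PySem.Int.floordiv (st.2 + 1) 2, 0)

def robKth_alt (len_nums : Int) (nums : List Int) (record_val : Int) (k : Int) : Bool :=
  decide (((PySem.List.slice nums none (some (max len_nums 0))).foldl (robAltStep record_val) (0, 0)).1 +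
    PySem.Int.floordiv (((PySem.List.slice nums none (some (max len_nums 0))).foldl (robAltStep record_val) (0, 0)).2 + 1) 2 ≥ k)

-- ===== PRECONDITION & SPEC =====
-- Pre_ excludes inputs where len_nums exceeds the real list length: there A's nums[ptr] access generally
-- raises IndexError (whether it actually raises depends on the data, so a few such inputs still return).
def Pre_robKth (len_nums : Int) (nums : List Int) (_record_val : Int) (_k : Int) : Prop :=
  len_nums ≤ (nums.length : Int)
instance (len_nums : Int) (nums : List Int) (record_val : Int) (k : Int) : Decidable (Pre_robKth len_nums nums record_val k) := by unfold Pre_robKth; infer_instance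
def pvWitness_robKth : Int × List Int × Int × Int := (3, [2, 7, 1], 3, 2)

def Spec_robKth (len_nums : Int) (nums : List Int) (record_val : Int) (k : Int) (out : Bool) : Prop := out = robKth_alt len_nums nums record_val k
instance (len_nums : Int) (nums : List Int) (record_val : Int) (k : Int) (out : Bool) : Decidable (Spec_robKth len_nums nums record_val k out) := by unfold Spec_robKth; infer_instance

-- ===== CLAIM (what is proved, stated in full; the proofs are below) =====
def Claim_equal_robKth : Prop := ∀ (len_nums : Int) (nums : List Int) (record_val : Int) (k : Int), Dom_robKth len_nums nums record_val k → Pre_robKth len_nums nums record_val k → Spec_robKth len_nums nums record_val k (robKth len_nums nums record_val k)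

-- ===== LEMMAS AND PROOFS =====

-- reference count: A's greedy on a plain list (take x, skip the next element)
def greedyCnt (v : Int) : List Int → Int
  | [] => 0
  | x :: t => if x ≤ v then 1 + greedyCnt v (t.drop 1) else greedyCnt v t
termination_by l => l.length
decreasing_by all_goals simp only [List.length_drop, List.length_cons]; omega

theorem floordiv_two (a : Int) (_ha : 0 ≤ a) : PySem.Int.floordiv a 2 = a / 2 :=
  PySem.Int.floordiv_eq_ediv_of_pos (by omega : (0:Int) < 2)

-- A's loop computes cnt + greedyCnt on the unvisited part of the length-len_nums prefix
theorem robKthLoop_eq (record_val : Int) :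
    ∀ (n : ℕ) (len_nums : Int) (nums : List Int) (ptr cnt : Int),
      0 ≤ ptr → len_nums ≤ (nums.length : Int) → (len_nums - ptr).toNat = n →
      robKthLoop len_nums nums record_val ptr cnt =
        cnt + greedyCnt record_val ((nums.take len_nums.toNat).drop ptr.toNat) := by
  intro n
  induction n using Nat.strong_induction_on with
  | _ n ih =>
    intro len_nums nums ptr cnt hptr hlen hn
    rw [robKthLoop]
    by_cases h : ptr < len_nums
    · have hlt : ptr.toNat < nums.length := by omega
      have hget : PySem.List.pyGet? nums ptr = some nums[ptr.toNat] := by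
        rw [PySem.List.pyGet?_of_nonneg nums hptr, List.getElem?_eq_getElem hlt]
      have hdrop : (nums.take len_nums.toNat).drop ptr.toNat =
          nums[ptr.toNat] :: (nums.take len_nums.toNat).drop (ptr.toNat + 1) := by
        have hlt' : ptr.toNat < (nums.take len_nums.toNat).length := by
          simp only [List.length_take]; omega
        rw [List.drop_eq_getElem_cons hlt']
        simp
      rw [dif_pos h, hget]
      dsimp only
      by_cases hv : nums[ptr.toNat] ≤ record_val
      · rw [if_pos hv,
            ih (len_nums - (ptr + 2)).toNat (by omega) len_nums nums (ptr + 2) (cnt + 1) (by omega) hlen rfl,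
            hdrop, greedyCnt, if_pos hv]
        have hdd : ((nums.take len_nums.toNat).drop (ptr.toNat + 1)).drop 1 =
            (nums.take len_nums.toNat).drop (ptr + 2).toNat := by
          rw [List.drop_drop]; congr 1; omega
        rw [hdd]; ring
      · rw [if_neg hv,
            ih (len_nums - (ptr + 1)).toNat (by omega) len_nums nums (ptr + 1) cnt (by omega) hlen rfl,
            hdrop, greedyCnt, if_neg hv]
        have hix : (ptr + 1).toNat = ptr.toNat + 1 := by omega
        rw [hix]
    · rw [dif_neg h]
      have : (nums.take len_nums.toNat).drop ptr.toNat = [] := by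
        apply List.drop_eq_nil_of_le
        simp only [List.length_take]
        omega
      rw [this]
      simp [greedyCnt]

-- B's run-length fold, with a pending run of length r, finishes to the greedy count:
-- an odd pending run's last take skips the head of the remaining list.
theorem foldAlt_eq (v : Int) :
    ∀ (l : List Int) (c r : Int), 0 ≤ r →
      (l.foldl (robAltStep v) (c, r)).1 + PySem.Int.floordiv ((l.foldl (robAltStep v) (c, r)).2 + 1) 2 =
        c + (r + 1) / 2 + (if r % 2 = 1 then greedyCnt v (l.drop 1) else greedyCnt v l) := by
  intro l
  induction l with
  | nil =>
    intro c r hr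
    simp only [List.foldl_nil, List.drop_nil, floordiv_two _ (by omega : (0:Int) ≤ r + 1)]
    by_cases hp : r % 2 = 1
    · rw [if_pos hp]; simp [greedyCnt]
    · rw [if_neg hp]; simp [greedyCnt]
  | cons x t ihl =>
    intro c r hr
    by_cases hx : x ≤ v
    · have hstep : robAltStep v (c, r) x = (c, r + 1) := by simp [robAltStep, hx]
      rw [List.foldl_cons, hstep, ihl c (r + 1) (by omega)]
      by_cases hp : r % 2 = 1
      · have hp2 : (r + 1) % 2 = 1 → False := by omega
        rw [if_pos hp, if_neg hp2]
        have : (r + 1 + 1) / 2 = (r + 1) / 2 := by omega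
        rw [this]
        simp
      · have hp2 : (r + 1) % 2 = 1 := by omega
        rw [if_neg hp, if_pos hp2]
        rw [greedyCnt, if_pos hx]
        have : (r + 1 + 1) / 2 = (r + 1) / 2 + 1 := by omega
        rw [this]
        ring
    · have hstep : robAltStep v (c, r) x = (c + PySem.Int.floordiv (r + 1) 2, 0) := by
        simp [robAltStep, hx]
      rw [List.foldl_cons, hstep, ihl _ 0 le_rfl, floordiv_two _ (by omega : (0:Int) ≤ r + 1)]
      have h0 : ((0:Int) + 1) / 2 = 0 := by omega
      have h02 : (if (0:Int) % 2 = 1 then greedyCnt v (t.drop 1) else greedyCnt v t) = greedyCnt v t :=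
        if_neg (by omega)
      rw [h0, h02]
      by_cases hp : r % 2 = 1
      · rw [if_pos hp]
        simp only [List.drop_one, List.tail_cons]
        ring
      · rw [if_neg hp, greedyCnt, if_neg hx]
        ring
    
theorem slice_pref (nums : List Int) (len_nums : Int) :
    PySem.List.slice nums none (some (max len_nums 0)) = nums.take len_nums.toNat := by
  have h0 : (0:Int) ≤ max len_nums 0 := le_max_right _ _
  have : max len_nums 0 = ((max len_nums 0).toNat : Int) := by omega
  rw [this, PySem.List.slice_to_natCast]
  congr 1
  omega

-- ===== VERDICT (by name: the statement is the Claim_ definition above) =====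
theorem robKth_spec : Claim_equal_robKth := by
  intro len_nums nums record_val k _hdom hpre
  unfold Spec_robKth robKth robKth_alt
  rw [slice_pref]
  rw [robKthLoop_eq record_val (len_nums - 0).toNat len_nums nums 0 0 le_rfl hpre rfl]
  have h := foldAlt_eq record_val (nums.take len_nums.toNat) 0 0 le_rfl
  rw [if_neg (by omega : ¬ ((0:Int) % 2 = 1))] at h
  rw [h]
  norm_num
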